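-- pv_equiv track=rewrite | github.com/yadavlaxmi/Codechef | number.py | positiveinteger
-- ===== SOURCE A (Python) =====
-- def positiveinteger(m,n):
--     i=m
--     sum1=0
--     while i<=n:
--         if i%3==0 and i%5==0:
--             sum1=sum1+i
--         i=i+1
--     return(sum1)
-- ===== SOURCE B (Python) =====
-- def positiveinteger(m, n):
--     # closed-form arithmetic series over the multiples of 15 in [m, n]
--     a = (m + 14) // 15        # smallest k with 15*k >= m
--     b = n // 15               # largest k with 15*k <= n
--     if a > b:
--         return 0
--     return 15 * (b * (b + 1) // 2 - (a - 1) * a // 2)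
-- ===== Notes on version B (the rewrite author's own statement) =====
-- stated objective: faster
-- what changed: Replaced the element-by-element while loop over [m,n] with a closed-form arithmetic-series formula over the multiples of 15 (floor/ceil division), removing the loop entirely.
import Mathlib
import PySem

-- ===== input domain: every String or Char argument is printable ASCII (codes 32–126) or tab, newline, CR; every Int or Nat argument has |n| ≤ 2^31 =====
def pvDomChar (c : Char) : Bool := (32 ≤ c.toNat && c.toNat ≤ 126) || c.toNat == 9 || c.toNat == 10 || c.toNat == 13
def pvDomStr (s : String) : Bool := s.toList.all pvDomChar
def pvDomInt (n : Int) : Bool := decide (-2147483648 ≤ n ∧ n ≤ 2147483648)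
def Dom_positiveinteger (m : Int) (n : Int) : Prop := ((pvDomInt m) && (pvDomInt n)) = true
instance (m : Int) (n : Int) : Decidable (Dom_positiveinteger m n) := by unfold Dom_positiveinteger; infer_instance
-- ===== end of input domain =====

-- B replaces A's element-by-element while loop with a closed-form arithmetic series
-- over the multiples of 15 in [m, n] (objective: faster, O(1) instead of O(n-m)).


-- ===== PORT A =====
-- while i<=n: if i%3==0 and i%5==0: sum1 += i; i += 1  — fuel = number of remaining iterations
def positiveintegerLoop : Nat → Int → Int → Int → Int
  | 0, _, _, sum1 => sum1
  | f + 1, i, n, sum1 =>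
    if i ≤ n then
      positiveintegerLoop f (i + 1) n
        (if PySem.Int.mod i 3 = 0 ∧ PySem.Int.mod i 5 = 0 then sum1 + i else sum1)
    else sum1

def positiveinteger (m : Int) (n : Int) : Int :=
  positiveintegerLoop (n + 1 - m).toNat m n 0

-- ===== PORT B =====
def positiveinteger_alt (m : Int) (n : Int) : Int :=
  let a := PySem.Int.floordiv (m + 14) 15
  let b := PySem.Int.floordiv n 15
  if a > b then 0
  else 15 * (PySem.Int.floordiv (b * (b + 1)) 2 - PySem.Int.floordiv ((a - 1) * a) 2)

-- ===== PRECONDITION & SPEC =====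
def Spec_positiveinteger (m : Int) (n : Int) (out : Int) : Prop := out = positiveinteger_alt m n
instance (m : Int) (n : Int) (out : Int) : Decidable (Spec_positiveinteger m n out) := by unfold Spec_positiveinteger; infer_instance

-- ===== CLAIM (what is proved, stated in full; the proofs are below) =====
def Claim_equal_positiveinteger : Prop := ∀ (m : Int) (n : Int), Dom_positiveinteger m n → Spec_positiveinteger m n (positiveinteger m n)

-- ===== LEMMAS AND PROOFS =====

-- triangular-number difference: T k - T (k-1) = k  (with Int `/`, exact since the products are even)
lemma tri_diff (k : Int) : k * (k + 1) / 2 - (k - 1) * k / 2 = k := by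
  have h : k * (k + 1) = (k - 1) * k + k * 2 := by ring
  rw [h, Int.add_mul_ediv_right _ _ (by norm_num : (2:Int) ≠ 0)]
  ring

lemma alt_unfold (m n : Int) :
    positiveinteger_alt m n =
      if (m + 14) / 15 > n / 15 then 0
      else 15 * ((n / 15) * (n / 15 + 1) / 2 - ((m + 14) / 15 - 1) * ((m + 14) / 15) / 2) := by
  simp only [positiveinteger_alt,
    PySem.Int.floordiv_eq_ediv_of_pos (by norm_num : (0:Int) < 15),
    PySem.Int.floordiv_eq_ediv_of_pos (by norm_num : (0:Int) < 2)]

lemma alt_empty (m n : Int) (h : n < m) : positiveinteger_alt m n = 0 := by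
  rw [alt_unfold]
  have : (m + 14) / 15 > n / 15 := by omega
  simp [this]

lemma alt_step (i n : Int) (h : i ≤ n) :
    positiveinteger_alt i n =
      (if i % 3 = 0 ∧ i % 5 = 0 then i else 0) + positiveinteger_alt (i + 1) n := by
  rw [alt_unfold, alt_unfold]
  by_cases h15 : i % 15 = 0
  · have hdvd : i % 3 = 0 ∧ i % 5 = 0 := by omega
    have ha : (i + 14) / 15 = i / 15 := by omega
    have ha' : (i + 1 + 14) / 15 = i / 15 + 1 := by omega
    have hab : i / 15 ≤ n / 15 := by omega
    rw [ha, ha', if_pos hdvd, if_neg (by omega)]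
    by_cases hg : i / 15 + 1 > n / 15
    · have hb : n / 15 = i / 15 := by omega
      rw [if_pos hg, hb]
      have h15i : 15 * (i / 15) = i := by omega
      linarith [tri_diff (i / 15)]
    · rw [if_neg hg]
      have h15i : 15 * (i / 15) = i := by omega
      have hsimp : i / 15 + 1 - 1 = i / 15 := by ring
      rw [hsimp]
      linarith [tri_diff (i / 15)]
  · have hdvd : ¬ (i % 3 = 0 ∧ i % 5 = 0) := by omega
    have ha : (i + 1 + 14) / 15 = (i + 14) / 15 := by omega
    rw [ha, if_neg hdvd, zero_add]

lemma loop_eq (n : Int) : ∀ (f : Nat) (i s : Int), (n + 1 - i).toNat = f →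
    positiveintegerLoop f i n s = s + positiveinteger_alt i n := by
  intro f
  induction f with
  | zero =>
    intro i s hf
    have : n < i := by omega
    rw [positiveintegerLoop, alt_empty i n this]
    ring
  | succ f ih =>
    intro i s hf
    have hle : i ≤ n := by omega
    rw [positiveintegerLoop, if_pos hle,
      ih (i + 1) _ (by omega), alt_step i n hle]
    have h3 : PySem.Int.mod i 3 = i % 3 :=
      PySem.Int.mod_eq_emod_of_pos (by norm_num)
    have h5 : PySem.Int.mod i 5 = i % 5 :=
      PySem.Int.mod_eq_emod_of_pos (by norm_num)
    rw [h3, h5]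
    split_ifs <;> ring

-- ===== VERDICT (by name: the statement is the Claim_ definition above) =====
theorem positiveinteger_spec : Claim_equal_positiveinteger := by
  intro m n _
  show positiveinteger m n = positiveinteger_alt m n
  rw [positiveinteger, loop_eq n _ m 0 rfl, zero_add]
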